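-- pv_equiv track=rewrite | github.com/Prince3069/bincom | bincom.py | process_binary_sequence
-- ===== SOURCE A (Python) =====
-- def process_binary_sequence(input_sequence: str) -> str:
--     """
--     Process the binary sequence according to the rule:
--     For every 1s that appear 3 times consecutively, the output will be 1,
--     otherwise the output will be 0.
--     """
--     output = []
--     for i in range(len(input_sequence)):
--         # Check if current position starts a sequence of three 1s
--         if (i + 2 < len(input_sequence) and
--             input_sequence[i] == '1' and
--             input_sequence[i+1] == '1' and
--             input_sequence[i+2] == '1'):
--             output.append('1')
--         else:
--             output.append('0')
--
--     return ''.join(output)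
-- ===== SOURCE B (Python) =====
-- def process_binary_sequence(input_sequence: str) -> str:
--     output = ['0'] * len(input_sequence)
--     pos = 0
--     while True:
--         idx = input_sequence.find('111', pos)
--         if idx == -1:
--             break
--         output[idx] = '1'
--         pos = idx + 1
--     return ''.join(output)
-- ===== Notes on version B (the rewrite author's own statement) =====
-- stated objective: faster
-- what changed: Replaces the per-index triple-character test with repeated str.find('111', pos) substring searches (advancing pos = idx+1 to keep overlapping matches) that mark a preallocated list of '0' characters.
import Mathlib
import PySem

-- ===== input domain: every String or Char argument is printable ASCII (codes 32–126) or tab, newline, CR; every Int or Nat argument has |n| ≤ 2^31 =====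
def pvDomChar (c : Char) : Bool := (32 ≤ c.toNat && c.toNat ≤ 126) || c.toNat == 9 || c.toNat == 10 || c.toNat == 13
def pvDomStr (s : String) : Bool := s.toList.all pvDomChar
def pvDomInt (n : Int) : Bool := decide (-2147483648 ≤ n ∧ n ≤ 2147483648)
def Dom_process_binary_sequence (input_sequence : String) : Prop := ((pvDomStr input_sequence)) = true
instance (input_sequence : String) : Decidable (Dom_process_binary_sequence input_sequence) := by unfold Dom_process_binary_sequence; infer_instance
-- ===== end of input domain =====

-- B replaces A's per-index triple test by repeated substring searches s.find('111', pos)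
-- marking a preallocated '0' array (objective: faster, constant-factor).

-- ===== PORT A =====
-- literal port of A: for each i in range(len(s)), append '1' if i+2 < len and s[i]=s[i+1]=s[i+2]='1' else '0';
-- ''.join of single-character strings is String.ofList.
def process_binary_sequence (input_sequence : String) : String :=
  let cs := input_sequence.toList
  let n : Int := (cs.length : Int)
  let output : List Char :=
    (PySem.List.pyRange 0 n 1).foldl (fun acc i =>
      if (decide (i + 2 < n)
          && (PySem.List.pyGet? cs i == some '1')
          && (PySem.List.pyGet? cs (i + 1) == some '1')
          && (PySem.List.pyGet? cs (i + 2) == some '1'))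
      then acc ++ ['1'] else acc ++ ['0']) []
  String.ofList output

-- ===== PORT B =====
-- the while loop of Source B: idx = s.find('111', pos); stop on -1, else output[idx] = '1', pos = idx+1.
-- fuel (= len+1, pos strictly increases per step) only makes the same computation total.
def pvMarkLoop (cs : List Char) (out : List Char) (pos : Nat) (fuel : Nat) : List Char :=
  match fuel with
  | 0 => out
  | fuel + 1 =>
    let idx := PySem.Chars.findFrom cs ['1', '1', '1'] (pos : Int) none
    if idx = -1 then out
    else pvMarkLoop cs (out.set idx.toNat '1') (idx.toNat + 1) fuel

def process_binary_sequence_alt (input_sequence : String) : String :=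
  let cs := input_sequence.toList
  String.ofList (pvMarkLoop cs (List.replicate cs.length '0') 0 (cs.length + 1))

-- ===== PRECONDITION & SPEC =====
def Spec_process_binary_sequence (input_sequence : String) (out : String) : Prop := out = process_binary_sequence_alt input_sequence
instance (input_sequence : String) (out : String) : Decidable (Spec_process_binary_sequence input_sequence out) := by unfold Spec_process_binary_sequence; infer_instance

-- ===== CLAIM (what is proved, stated in full; the proofs are below) =====
def Claim_equal_process_binary_sequence : Prop := ∀ (input_sequence : String), Dom_process_binary_sequence input_sequence → Spec_process_binary_sequence input_sequence (process_binary_sequence input_sequence)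

-- ===== LEMMAS AND PROOFS =====

-- the common characterisation: position i is '1' iff "111" starts at i
def pvSpecMap (cs : List Char) : List Char :=
  (List.range cs.length).map (fun i => if ['1', '1', '1'] <+: cs.drop i then '1' else '0')

theorem pv_triple_prefix_iff (l : List Char) :
    (['1', '1', '1'] <+: l) ↔ (l[0]? = some '1' ∧ l[1]? = some '1' ∧ l[2]? = some '1') := by
  match l with
  | [] => simp
  | [a] => simp [List.cons_prefix_cons]
  | [a, b] => simp [List.cons_prefix_cons]
  | a :: b :: c :: t => simp [List.cons_prefix_cons, eq_comm]

theorem pv_foldl_ite_append {α β : Type} (c : α → Bool) (x y : β) (xs : List α) (acc : List β) :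
    xs.foldl (fun a i => if c i then a ++ [x] else a ++ [y]) acc
      = acc ++ xs.map (fun i => if c i then x else y) := by
  induction xs generalizing acc with
  | nil => simp
  | cons h t ih => simp only [List.foldl_cons, List.map_cons]; split <;> simp [ih]

theorem pv_cond_iff (cs : List Char) (k : Nat) :
    ((decide ((k : Int) + 2 < (cs.length : Int))
      && (PySem.List.pyGet? cs (k : Int) == some '1')
      && (PySem.List.pyGet? cs ((k : Int) + 1) == some '1')
      && (PySem.List.pyGet? cs ((k : Int) + 2) == some '1')) = true)
      ↔ ['1', '1', '1'] <+: cs.drop k := by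
  have h1 : ((k : Int) + 1) = ((k + 1 : Nat) : Int) := by push_cast; ring
  have h2 : ((k : Int) + 2) = ((k + 2 : Nat) : Int) := by push_cast; ring
  rw [h1, h2]
  simp only [PySem.List.pyGet?_natCast, Bool.and_eq_true, decide_eq_true_eq, beq_iff_eq,
    pv_triple_prefix_iff, List.getElem?_drop, Nat.add_zero]
  constructor
  · rintro ⟨⟨⟨_, h0⟩, ha⟩, hc⟩; exact ⟨h0, ha, hc⟩
  · rintro ⟨h0, ha, hc⟩
    have hb : k + 2 < cs.length := (List.getElem?_eq_some_iff.mp hc).1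
    exact ⟨⟨⟨by exact_mod_cast hb, h0⟩, ha⟩, hc⟩

theorem pv_A_eq_spec (cs : List Char) :
    process_binary_sequence (String.ofList cs) = String.ofList (pvSpecMap cs) := by
  unfold process_binary_sequence pvSpecMap
  simp only [String.toList_ofList]
  congr 1
  rw [pv_foldl_ite_append, List.nil_append, PySem.List.pyRange_one]
  have hn : (((cs.length : Int) - 0).toNat) = cs.length := by omega
  rw [hn, List.map_map]
  apply List.map_congr_left
  intro k hk
  simp only [Function.comp_apply, zero_add]
  exact if_congr (pv_cond_iff cs k) rfl rfl

theorem pv_markLoop_eq (cs : List Char) (fuel pos : Nat) (out : List Char)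
    (hpos : pos ≤ cs.length) (hfuel : cs.length + 1 ≤ fuel + pos)
    (hlen : out.length = cs.length)
    (hinv : ∀ i, i < cs.length →
      out[i]? = some (if ['1', '1', '1'] <+: cs.drop i ∧ i < pos then '1' else '0')) :
    pvMarkLoop cs out pos fuel = pvSpecMap cs := by
  induction fuel generalizing pos out with
  | zero => omega
  | succ fuel ih =>
    simp only [pvMarkLoop]
    by_cases hidx : PySem.Chars.findFrom cs ['1', '1', '1'] (pos : Int) none = -1
    · rw [if_pos hidx]
      have hnone : ¬ ['1', '1', '1'] <:+: cs.drop pos :=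
        (PySem.Chars.findFrom_natCast_eq_neg_one_iff cs ['1', '1', '1'] pos hpos).mp hidx
      have hlt : ∀ i, ['1', '1', '1'] <+: cs.drop i → i < pos := by
        intro i hp
        by_contra hge
        push Not at hge
        apply hnone
        have hdd : (cs.drop pos).drop (i - pos) = cs.drop i := by
          rw [List.drop_drop]; congr 1; omega
        rw [← hdd] at hp
        exact hp.isInfix.trans (List.drop_suffix _ _).isInfix
      apply List.ext_getElem?
      intro i
      by_cases hi : i < cs.length
      · rw [hinv i hi]
        unfold pvSpecMap
        rw [List.getElem?_map, List.getElem?_range hi]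
        simp only [Option.map_some]
        congr 1
        by_cases hp : ['1', '1', '1'] <+: cs.drop i
        · simp [hp, hlt i hp]
        · simp [hp]
      · have h1 : out[i]? = none := by rw [List.getElem?_eq_none]; omega
        have h2 : (pvSpecMap cs)[i]? = none := by
          rw [List.getElem?_eq_none]; unfold pvSpecMap; simp; omega
        rw [h1, h2]
    · rw [if_neg hidx]
      obtain ⟨hge, hpre, hmin⟩ :=
        PySem.Chars.findFrom_natCast_spec cs ['1', '1', '1'] pos hpos hidx
      set jI := PySem.Chars.findFrom cs ['1', '1', '1'] (pos : Int) none with hjI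
      set j := jI.toNat with hj
      have hjge : pos ≤ j := by omega
      have hj3 : j + 3 ≤ cs.length := by
        have hle := hpre.length_le
        simp only [List.length_drop, List.length_cons, List.length_nil] at hle
        omega
      apply ih (j + 1) _ (by omega) (by omega) (by simp [hlen])
      intro i hi
      rw [List.getElem?_set]
      by_cases hij : j = i
      · subst hij
        rw [if_pos rfl, hlen, if_pos (show j < cs.length by omega)]
        simp [hpre]
      · rw [if_neg hij, hinv i hi]
        congr 1
        by_cases hp : ['1', '1', '1'] <+: cs.drop i
        · by_cases hip : i < pos
          · simp [hp, hip, show i < j + 1 by omega]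
          · have hnotlt : ¬ i < j + 1 := by
              by_contra hc
              push Not at hip
              exact hmin i hip (by omega) hp
            simp [hip, hnotlt]
        · simp [hp]

theorem pv_B_eq_spec (cs : List Char) :
    process_binary_sequence_alt (String.ofList cs) = String.ofList (pvSpecMap cs) := by
  unfold process_binary_sequence_alt
  simp only [String.toList_ofList]
  congr 1
  apply pv_markLoop_eq cs (cs.length + 1) 0 _ (by omega) (by omega) (by simp)
  intro i hi
  simp [hi]

-- ===== VERDICT (by name: the statement is the Claim_ definition above) =====
theorem process_binary_sequence_spec : Claim_equal_process_binary_sequence := by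
  intro s _
  unfold Spec_process_binary_sequence
  have h : s = String.ofList s.toList := by simp
  rw [h, pv_A_eq_spec, pv_B_eq_spec]
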